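-- pv_equiv track=rewrite | github.com/TT-CL/iuextract | utils/statistics.py | bin_perfect_match
-- ===== SOURCE A (Python) =====
-- def bin_perfect_match(bin1, bin2):
--     perfect_matches = 0
--
--     prev_flag = True #the starting boundary is always in agreement
--     for b1,b2 in zip(bin1, bin2):
--         #If both binaries are 1
--         if b1 == 1 and b2 == 1:
--             # a perfect match happens only when there is an agreement
--             # between both boundaries of a segment
--             # I need a previous boundary agreement (signaled by prev_flag)
--             # and I need to only find 0s in both binaries when the next
--             # agreement happens
--             if prev_flag is False:
--                 prev_flag = True
--             else:
--                 perfect_matches += 1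
--         #if either binary is one but the other is not
--         elif b1 == 1 or b2 == 1:
--             # I found a disagreement, turn of the prev agreement flag
--             prev_flag = False
--     if prev_flag is True:
--         # the end of the text is always an agreement boundary
--         perfect_matches +=1
--     return perfect_matches
-- ===== SOURCE B (Python) =====
-- def bin_perfect_match(bin1, bin2):
--     # classify each position: keep True for agreement (both 1), False for
--     # disagreement (exactly one is 1); positions where neither is 1 vanish
--     flags = [(b1 == 1, b2 == 1) for b1, b2 in zip(bin1, bin2)]
--     events = [a and b for a, b in flags if a or b]
--     # virtual agreement boundaries at the start and the end of the text
--     seq = [True] + events + [True]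
--     # a perfect match is exactly an adjacent pair of agreements
--     return sum(1 for x, y in zip(seq, seq[1:]) if x and y)
-- ===== Notes on version B (the rewrite author's own statement) =====
-- stated objective: simpler
-- what changed: Replaces A's running prev_flag state machine with a stateless pipeline: classify each zipped position into agreement/disagreement events (dropping no-boundary positions), bookend with virtual agreement boundaries, and count adjacent agreement pairs.
import Mathlib
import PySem

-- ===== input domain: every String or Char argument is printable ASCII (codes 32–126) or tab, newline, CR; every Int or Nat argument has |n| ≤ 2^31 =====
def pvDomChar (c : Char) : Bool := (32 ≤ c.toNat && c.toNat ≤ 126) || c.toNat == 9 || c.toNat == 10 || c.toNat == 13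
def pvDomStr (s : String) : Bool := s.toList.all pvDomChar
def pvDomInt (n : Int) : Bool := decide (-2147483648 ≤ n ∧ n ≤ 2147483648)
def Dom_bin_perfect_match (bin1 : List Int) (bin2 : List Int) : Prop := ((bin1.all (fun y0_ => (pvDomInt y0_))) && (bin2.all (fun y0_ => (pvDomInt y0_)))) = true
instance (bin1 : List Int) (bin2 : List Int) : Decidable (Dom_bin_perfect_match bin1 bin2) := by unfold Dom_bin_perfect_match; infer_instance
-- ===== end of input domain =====

-- B replaces A's running prev_flag state machine by a classify-then-count pipeline
-- (filter out no-boundary positions, bookend with virtual agreements, count adjacent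
-- agreement pairs); objective: simpler. Both are one pass, O(n).

-- ===== PORT A =====
-- A's loop body: state (perfect_matches, prev_flag)
def pvAStep (st : Int × Bool) (p : Int × Int) : Int × Bool :=
  if p.1 == 1 && p.2 == 1 then
    if st.2 == false then (st.1, true) else (st.1 + 1, st.2)
  else if p.1 == 1 || p.2 == 1 then (st.1, false)
  else st

def bin_perfect_match (bin1 : List Int) (bin2 : List Int) : Int :=
  let r := (List.zip bin1 bin2).foldl pvAStep (0, true)
  if r.2 then r.1 + 1 else r.1

-- ===== PORT B =====
-- 'events' pipeline of Source B: map to the two ==1 flags, keep rows where either holds,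
-- map to the conjunction (comprehension with a filter → map ∘ filter ∘ map)
def pvEvents (l : List (Int × Int)) : List Bool :=
  ((l.map (fun p => (p.1 == 1, p.2 == 1))).filter (fun q => q.1 || q.2)).map
    (fun q => q.1 && q.2)

def bin_perfect_match_alt (bin1 : List Int) (bin2 : List Int) : Int :=
  let events := pvEvents (List.zip bin1 bin2)
  let seq := true :: (events ++ [true])
  -- sum(1 for x, y in zip(seq, seq[1:]) if x and y); seq[1:] = seq.tail (exact here)
  (List.zip seq seq.tail).foldl (fun acc p => if p.1 && p.2 then acc + 1 else acc) 0

-- ===== PRECONDITION & SPEC =====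
def Spec_bin_perfect_match (bin1 : List Int) (bin2 : List Int) (out : Int) : Prop := out = bin_perfect_match_alt bin1 bin2
instance (bin1 : List Int) (bin2 : List Int) (out : Int) : Decidable (Spec_bin_perfect_match bin1 bin2 out) := by unfold Spec_bin_perfect_match; infer_instance

-- ===== CLAIM (what is proved, stated in full; the proofs are below) =====
def Claim_equal_bin_perfect_match : Prop := ∀ (bin1 : List Int) (bin2 : List Int), Dom_bin_perfect_match bin1 bin2 → Spec_bin_perfect_match bin1 bin2 (bin_perfect_match bin1 bin2)

-- ===== LEMMAS AND PROOFS =====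

-- count of adjacent (true,true) pairs, recursively
def pvCadj : List Bool → Int
  | x :: y :: rest => (if x && y then 1 else 0) + pvCadj (y :: rest)
  | _ => 0

theorem pvZipTail_aux (seq : List Bool) : ∀ (x : Bool) (c : Int),
    (List.zip (x :: seq) seq).foldl (fun acc p => if p.1 && p.2 then acc + 1 else acc) c
      = c + pvCadj (x :: seq) := by
  induction seq with
  | nil => intro x c; simp [pvCadj]
  | cons y r ih =>
      intro x c
      simp only [List.zip_cons_cons, List.foldl_cons, pvCadj]
      rw [ih]
      split_ifs <;> ring

-- B's zip-with-tail fold computes pvCadj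
theorem pvZipTail (seq : List Bool) (c : Int) :
    (List.zip seq seq.tail).foldl (fun acc p => if p.1 && p.2 then acc + 1 else acc) c
      = c + pvCadj seq := by
  cases seq with
  | nil => simp [pvCadj]
  | cons x t => simpa using pvZipTail_aux t x c

-- loop invariant: A's fold from (c, flag), finished by the final +1, equals
-- c plus the adjacent-agreement count of flag :: events ++ [true]
theorem pvMain (l : List (Int × Int)) (c : Int) (flag : Bool) :
    (if (l.foldl pvAStep (c, flag)).2 then (l.foldl pvAStep (c, flag)).1 + 1
     else (l.foldl pvAStep (c, flag)).1)
      = c + pvCadj (flag :: (pvEvents l ++ [true])) := by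
  induction l generalizing c flag with
  | nil => cases flag <;> simp [pvEvents, pvCadj]
  | cons p rest ih =>
      by_cases hb : (p.1 == 1 && p.2 == 1) = true
      · have he : pvEvents (p :: rest) = true :: pvEvents rest := by
          have hb' := hb
          simp only [Bool.and_eq_true, beq_iff_eq] at hb'
          simp [pvEvents, hb'.1, hb'.2]
        simp only [List.foldl_cons, pvAStep]
        rw [if_pos hb, he]
        cases flag with
        | false =>
            rw [show (if ((false : Bool) == false) = true then ((c : Int), true)
                     else (c + 1, false)) = (c, true) by simp]
            rw [ih]
            simp [pvCadj]
        | true =>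
            rw [show (if ((true : Bool) == false) = true then ((c : Int), true)
                     else (c + 1, true)) = (c + 1, true) by simp]
            rw [ih]
            simp [pvCadj]; ring
      · by_cases ho : (p.1 == 1 || p.2 == 1) = true
        · have he : pvEvents (p :: rest) = false :: pvEvents rest := by
            have hb' := hb; have ho' := ho
            simp only [Bool.or_eq_true, beq_iff_eq] at ho'
            simp only [Bool.and_eq_true, beq_iff_eq, not_and] at hb'
            rcases ho' with h1 | h2
            · simp [pvEvents, h1, hb' h1]
            · rcases eq_or_ne p.1 1 with hh | hh
              · exact absurd h2 (hb' hh)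
              · simp [pvEvents, hh, h2]
          simp only [List.foldl_cons, pvAStep]
          rw [if_neg hb, if_pos ho, ih, he]
          cases flag <;> simp [pvCadj]
        · have he : pvEvents (p :: rest) = pvEvents rest := by
            have ho' := ho
            simp only [Bool.or_eq_true, not_or, beq_iff_eq] at ho'
            simp [pvEvents, ho'.1, ho'.2]
          simp only [List.foldl_cons, pvAStep]
          rw [if_neg hb, if_neg ho, ih, he]

-- ===== VERDICT (by name: the statement is the Claim_ definition above) =====
theorem bin_perfect_match_spec : Claim_equal_bin_perfect_match := by
  intro bin1 bin2 _
  unfold Spec_bin_perfect_match bin_perfect_match bin_perfect_match_alt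
  rw [pvZipTail]
  have := pvMain (List.zip bin1 bin2) 0 true
  simpa using this
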